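-- pv_equiv track=rewrite | github.com/gnjardim/prog1_puc-rio | Old/Exercicios P1 - Condicionais e Recursão/respostas P1 2017.2.py | qntAlg
-- ===== SOURCE A (Python) =====
-- def qntAlg(s):
--     if not s:
--         return -1
--     if s[0]=='@':
--         return 0
--     cont=qntAlg(s[1:])
--     if cont==-1:
--         return -1
--     if '0'<=s[0]<='9':
--         return 1+cont
--     return cont
-- ===== SOURCE B (Python) =====
-- def qntAlg(s):
--     idx = s.find('@')
--     if idx == -1:
--         return -1
--     return sum(1 for c in s[:idx] if '0' <= c <= '9')
-- ===== Notes on version B (the rewrite author's own statement) =====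
-- stated objective: faster
-- what changed: Replaced A's suffix recursion (which copies the tail s[1:] at every step and threads a -1 sentinel outward) by a two-phase locate-then-count: find the first at-sign once, then count digits in the prefix before it.
import Mathlib
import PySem

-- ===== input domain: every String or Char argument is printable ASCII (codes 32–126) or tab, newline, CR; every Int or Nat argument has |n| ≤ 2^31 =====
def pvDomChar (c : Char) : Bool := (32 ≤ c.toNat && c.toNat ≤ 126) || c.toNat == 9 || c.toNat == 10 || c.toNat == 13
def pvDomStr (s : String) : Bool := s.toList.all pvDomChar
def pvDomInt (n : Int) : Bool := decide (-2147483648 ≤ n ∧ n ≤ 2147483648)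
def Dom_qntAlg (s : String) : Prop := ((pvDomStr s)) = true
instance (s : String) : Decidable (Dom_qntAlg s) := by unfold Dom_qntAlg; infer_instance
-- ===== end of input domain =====

-- B replaces A's suffix recursion (threading a -1 sentinel through every return) by a
-- locate-then-count two-phase computation: find the first '@' once, then count the digits
-- in the prefix before it (objective: simpler).

-- ===== PORT A =====
def qntAlgRec : List Char → Int
  | [] => -1
  | c :: rest =>
    if c = '@' then 0
    else
      let cont := qntAlgRec rest
      if cont = -1 then -1
      else if '0' ≤ c ∧ c ≤ '9' then 1 + cont else cont

def qntAlg (s : String) : Int := qntAlgRec s.toList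

-- ===== PORT B =====
def qntAlg_alt (s : String) : Int :=
  let idx := PySem.Str.find s "@"
  if idx = -1 then -1
  else ((PySem.List.slice s.toList none (some idx)).countP
          (fun c => decide ('0' ≤ c ∧ c ≤ '9')) : Int)

-- ===== PRECONDITION & SPEC =====
def Spec_qntAlg (s : String) (out : Int) : Prop := out = qntAlg_alt s
instance (s : String) (out : Int) : Decidable (Spec_qntAlg s out) := by unfold Spec_qntAlg; infer_instance

-- ===== CLAIM (what is proved, stated in full; the proofs are below) =====
def Claim_equal_qntAlg : Prop := ∀ (s : String), Dom_qntAlg s → Spec_qntAlg s (qntAlg s)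

-- ===== LEMMAS AND PROOFS =====

-- how Chars.find behaves on a cons, for a single-character pattern
lemma find_singleton_cons (a c : Char) (rest : List Char) :
    PySem.Chars.find (c :: rest) [a] =
      if c = a then 0
      else if PySem.Chars.find rest [a] = -1 then -1
      else 1 + PySem.Chars.find rest [a] := by
  split_ifs with hca hrest
  · -- first char matches: find = 0
    subst hca
    have hinf : [c] <:+: (c :: rest) := ⟨[], rest, rfl⟩
    have h0 : 0 ≤ PySem.Chars.find (c :: rest) [c] :=
      (PySem.Chars.find_nonneg_iff _ _).mpr hinf
    have hs := PySem.Chars.find_spec h0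
    have hz : (PySem.Chars.find (c :: rest) [c]).toNat = 0 := by
      by_contra hnz
      exact hs.2 0 (Nat.pos_of_ne_zero hnz) ⟨rest, rfl⟩
    omega
  · -- no occurrence anywhere: not an infix of the cons either
    have hni : ¬ [a] <:+: rest := (PySem.Chars.find_eq_neg_one_iff _ _).mp hrest
    apply (PySem.Chars.find_eq_neg_one_iff _ _).mpr
    intro hinf
    rcases hinf with ⟨p, t, hpt⟩
    cases p with
    | nil =>
      simp at hpt
      exact hca hpt.1.symm
    | cons x xs =>
      apply hni
      have h2 : xs ++ [a] ++ t = rest := by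
        have h3 := congrArg List.tail hpt
        simpa using h3
      exact ⟨xs, t, h2⟩
  · -- first occurrence in rest at g: in the cons it is at 1 + g
    set g := PySem.Chars.find rest [a] with hg
    have hg0 : 0 ≤ g := by
      have := PySem.Chars.neg_one_le_find rest [a]
      omega
    have hgs := PySem.Chars.find_spec hg0
    set f := PySem.Chars.find (c :: rest) [a] with hf
    have hfin : [a] <:+: (c :: rest) := by
      rcases hgs.1 with ⟨t, ht⟩
      refine ⟨c :: rest.take g.toNat, t, ?_⟩
      have hsplit : rest = rest.take g.toNat ++ ([a] ++ t) := by
        rw [ht]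
        exact (List.take_append_drop _ _).symm
      calc (c :: rest.take g.toNat) ++ [a] ++ t
          = c :: (rest.take g.toNat ++ ([a] ++ t)) := by simp
        _ = c :: rest := by rw [← hsplit]
    have hf0 : 0 ≤ f := (PySem.Chars.find_nonneg_iff _ _).mpr hfin
    have hfs := PySem.Chars.find_spec hf0
    have hfne : f.toNat ≠ 0 := by
      intro h0
      rcases hfs.1 with ⟨t, ht⟩
      rw [h0] at ht
      simp at ht
      exact hca ht.1.symm
    have hat : [a] <+: (c :: rest).drop (1 + g.toNat) := by
      rw [Nat.add_comm, List.drop_succ_cons]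
      exact hgs.1
    have hle : f.toNat ≤ 1 + g.toNat := by
      by_contra hlt
      exact hfs.2 (1 + g.toNat) (by omega) hat
    have hge : 1 + g.toNat ≤ f.toNat := by
      by_contra hlt
      rw [not_le] at hlt
      have h1 : 1 ≤ f.toNat := Nat.one_le_iff_ne_zero.mpr hfne
      have hp := hfs.1
      rw [show f.toNat = (f.toNat - 1) + 1 by omega, List.drop_succ_cons] at hp
      exact hgs.2 (f.toNat - 1) (by omega) hp
    omega

-- '@' never occurs in the empty string
lemma find_nil_at : PySem.Chars.find ([] : List Char) ['@'] = -1 := by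
  apply (PySem.Chars.find_eq_neg_one_iff _ _).mpr
  intro h
  exact absurd h.sublist (by simp)

-- the main characterisation: A's recursion equals B's locate-then-count on char lists
lemma qntAlgRec_eq (l : List Char) :
    qntAlgRec l =
      if PySem.Chars.find l ['@'] = -1 then -1
      else (((l.take (PySem.Chars.find l ['@']).toNat).countP
              (fun c => decide ('0' ≤ c ∧ c ≤ '9'))) : Int) := by
  induction l with
  | nil => simp [qntAlgRec, find_nil_at]
  | cons c rest ih =>
    rw [find_singleton_cons '@' c rest]
    by_cases hca : c = '@'
    · subst hca
      simp [qntAlgRec]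
    · by_cases hrest : PySem.Chars.find rest ['@'] = -1
      · simp [qntAlgRec, hca, hrest, ih]
      · have hg0 : 0 ≤ PySem.Chars.find rest ['@'] := by
          have := PySem.Chars.neg_one_le_find rest ['@']
          omega
        have h1g : (1 + PySem.Chars.find rest ['@']) ≠ -1 := by omega
        have htn : (1 + PySem.Chars.find rest ['@']).toNat
            = (PySem.Chars.find rest ['@']).toNat + 1 := by omega
        have hcnt : ((List.countP (fun c => decide ('0' ≤ c ∧ c ≤ '9'))
            (List.take (PySem.Chars.find rest ['@']).toNat rest) : Int)) ≠ -1 := by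
          omega
        simp only [qntAlgRec, if_neg hca, ih, if_neg hrest]
        rw [if_neg h1g, htn, List.take_succ_cons, List.countP_cons, if_neg hcnt]
        by_cases hd : '0' ≤ c ∧ c ≤ '9'
        · simp only [hd, decide_true, and_self]
          push_cast
          ring
        · simp [hd]

-- ===== VERDICT (by name: the statement is the Claim_ definition above) =====
theorem qntAlg_spec : Claim_equal_qntAlg := by
  intro s _
  unfold Spec_qntAlg qntAlg qntAlg_alt
  have hfind : PySem.Str.find s "@" = PySem.Chars.find s.toList ['@'] := by
    simp [PySem.Str.find_eq]
  rw [hfind, qntAlgRec_eq s.toList]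
  by_cases h : PySem.Chars.find s.toList ['@'] = -1
  · simp [h]
  · have h0 : 0 ≤ PySem.Chars.find s.toList ['@'] := by
      have := PySem.Chars.neg_one_le_find s.toList ['@']
      omega
    simp only [if_neg h]
    rw [PySem.List.slice_to s.toList h0]
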